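-- pv_equiv track=rewrite | github.com/pagrawal15/Stock-price-pipeline | count_users.py | count_users
-- ===== SOURCE A (Python) =====
-- def count_users(emails):
--
--     domain = []
--     for e in emails:
--         s = e.split("@")
--         domain.append(s[-1])
--
--     freq_dict = {}
--
--     for d in domain:
--         if d not in freq_dict:
--             freq_dict[d] = 1
--         else:
--             freq_dict[d] += 1
--
--     return freq_dict
-- ===== SOURCE B (Python) =====
-- def count_users(emails):
--     # Different decomposition: extract all domains, sort them, count each run of
--     # equal adjacent domains; emit keys in first-occurrence order via dict.fromkeys.
--     domains = [e.split("@")[-1] for e in emails]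
--     counts = {}
--     run = None
--     c = 0
--     for d in sorted(domains):
--         if d == run:
--             c += 1
--         else:
--             if run is not None:
--                 counts[run] = c
--             run = d
--             c = 1
--     if run is not None:
--         counts[run] = c
--     return {d: counts[d] for d in dict.fromkeys(domains)}
-- ===== Notes on version B (the rewrite author's own statement) =====
-- stated objective: alternative
-- what changed: Replaces the incremental dict-tallying loop by sorting the extracted domain list and counting runs of equal adjacent domains, then emitting keys in first-occurrence order via dict.fromkeys.
import Mathlib
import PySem

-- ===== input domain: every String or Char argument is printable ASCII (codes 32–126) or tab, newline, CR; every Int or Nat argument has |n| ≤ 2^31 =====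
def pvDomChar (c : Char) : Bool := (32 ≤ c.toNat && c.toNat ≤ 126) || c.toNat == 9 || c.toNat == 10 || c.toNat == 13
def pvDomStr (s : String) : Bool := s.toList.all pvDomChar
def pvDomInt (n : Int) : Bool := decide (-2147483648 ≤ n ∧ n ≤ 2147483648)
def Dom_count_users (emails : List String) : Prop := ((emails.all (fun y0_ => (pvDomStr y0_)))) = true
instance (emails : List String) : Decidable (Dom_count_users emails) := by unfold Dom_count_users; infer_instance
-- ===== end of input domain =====

-- B replaces A's incremental dict-tallying loop by sort-then-count-adjacent-runs,
-- emitting keys in first-occurrence order (alternative algorithm; not claimed faster).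


-- ===== PORT A =====
-- e.split("@"): PySem.Str.split? with sep "@" ≠ "" is always some, and the result is
-- nonempty, so .getD [] and s[-1] = .getLastD "" are exact here
def count_users (emails : List String) : List (String × Int) :=
  let domain := emails.foldl (fun acc e => acc ++ [((PySem.Str.split? e "@").getD []).getLastD ""]) []
  let freq_dict := domain.foldl
    (fun fd d => if fd.contains d = false then fd.insert d 1 else fd.insert d (fd.getD d 0 + 1))
    (PySem.Dict.empty : PySem.Dict String Int)
  freq_dict.items

-- ===== PORT B =====
-- one iteration of B's run-counting loop: state = (counts, run, c)
def tallyStep (st : PySem.Dict String Int × Option String × Int) (d : String) :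
    PySem.Dict String Int × Option String × Int :=
  if some d == st.2.1 then (st.1, st.2.1, st.2.2 + 1)
  else
    match st.2.1 with
    | none => (st.1, some d, 1)
    | some r => (st.1.insert r st.2.2, some d, 1)

-- the 'if run is not None: counts[run] = c' after the loop
def tallyFinish (st : PySem.Dict String Int × Option String × Int) : PySem.Dict String Int :=
  match st.2.1 with
  | none => st.1
  | some r => st.1.insert r st.2.2

-- counts[d] in the comprehension: every distinct domain got a run, so getD d 0 is exact
def count_users_alt (emails : List String) : List (String × Int) :=
  let domains := emails.map (fun e => ((PySem.Str.split? e "@").getD []).getLastD "")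
  let counts := tallyFinish
    ((PySem.List.sorted domains (fun d => d)).foldl tallyStep (PySem.Dict.empty, none, 0))
  (PySem.List.dedup domains).map (fun d => (d, counts.getD d 0))

-- ===== PRECONDITION & SPEC =====
def Spec_count_users (emails : List String) (out : List (String × Int)) : Prop := out = count_users_alt emails
instance (emails : List String) (out : List (String × Int)) : Decidable (Spec_count_users emails out) := by unfold Spec_count_users; infer_instance

-- ===== CLAIM (what is proved, stated in full; the proofs are below) =====
def Claim_equal_count_users : Prop := ∀ (emails : List String), Dom_count_users emails → Spec_count_users emails (count_users emails)

-- ===== LEMMAS AND PROOFS =====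
-- A's branched tally step is extensionally the unconditional insert-(getD+1) step
theorem count_users_step_eq :
    (fun (fd : PySem.Dict String Int) (d : String) =>
        if fd.contains d = false then fd.insert d 1 else fd.insert d (fd.getD d 0 + 1))
    = (fun (fd : PySem.Dict String Int) (d : String) => fd.insert d (fd.getD d 0 + 1)) := by
  funext fd d
  by_cases h : fd.contains d = false
  · simp [h, PySem.Dict.getD_of_not_contains fd (0:Int) h]
  · simp [h]

-- invariant of B's run-counting loop on a sorted suffix: the finished dict reads back
-- the current run's total, the suffix's counts, and the already-stored counts
theorem tally_go (s : List String) : ∀ (counts : PySem.Dict String Int) (r : String) (c : Int),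
    List.Pairwise (· ≤ ·) s → (∀ x ∈ s, r ≤ x) →
    ∀ d, (tallyFinish (s.foldl tallyStep (counts, some r, c))).getD d 0 =
      if d = r then c + (s.count r : Int)
      else if d ∈ s then (s.count d : Int) else counts.getD d 0 := by
  induction s with
  | nil =>
    intro counts r c _ _ d
    simp [tallyFinish, PySem.Dict.getD_insert]
  | cons x t ih =>
    intro counts r c hs hr d
    by_cases hx : x = r
    · subst hx
      rw [List.foldl_cons]
      have hstep : tallyStep (counts, some x, c) x = (counts, some x, c + 1) := by
        simp [tallyStep]
      rw [hstep, ih counts x (c+1) hs.of_cons (fun y hy => hr y (List.mem_cons_of_mem _ hy))]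
      by_cases hd : d = x
      · subst hd; simp; ring
      · simp [hd, Ne.symm hd, List.mem_cons]
    · rw [List.foldl_cons]
      have hstep : tallyStep (counts, some r, c) x = (counts.insert r c, some x, 1) := by
        simp [tallyStep, hx]
      have hrx : r < x := lt_of_le_of_ne (hr x (List.mem_cons_self)) (fun h => hx h.symm)
      have hxt : ∀ y ∈ t, x ≤ y := fun y hy => List.rel_of_pairwise_cons hs hy
      rw [hstep, ih (counts.insert r c) x 1 hs.of_cons hxt]
      have hrnot : r ∉ x :: t := by
        intro hmem
        rcases List.mem_cons.mp hmem with h | h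
        · exact absurd h.symm (ne_of_lt hrx).symm
        · exact absurd (hxt r h) (not_le.mpr hrx)
      by_cases hd : d = x
      · subst hd
        simp [hx]
        push_cast; ring
      · by_cases hdr : d = r
        · subst hdr
          have hdt : d ∉ t := fun h => hrnot (List.mem_cons_of_mem _ h)
          simp [hd, hdt, List.count_eq_zero_of_not_mem hrnot]
        · simp [hd, hdr, List.mem_cons, Ne.symm hd, PySem.Dict.getD_insert]

-- on a sorted list, B's run-counting loop produces exactly the multiplicities
theorem tally_count (s : List String) (hs : List.Pairwise (· ≤ ·) s) (d : String) :
    (tallyFinish (s.foldl tallyStep (PySem.Dict.empty, none, 0))).getD d 0 = (s.count d : Int) := by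
  cases s with
  | nil => simp [tallyFinish, List.foldl, PySem.Dict.getD_empty]
  | cons x t =>
    rw [List.foldl_cons]
    have hstep : tallyStep (PySem.Dict.empty, none, 0) x = (PySem.Dict.empty, some x, 1) := by
      simp [tallyStep]
    rw [hstep, tally_go t PySem.Dict.empty x 1 hs.of_cons
      (fun y hy => List.rel_of_pairwise_cons hs hy) d]
    by_cases hd : d = x
    · subst hd; simp; push_cast; ring
    · simp only [hd, if_false, PySem.Dict.getD_empty]
      split_ifs with h
      · simp [List.count_cons, Ne.symm hd]
      · simp [List.count_cons, Ne.symm hd, List.count_eq_zero_of_not_mem h]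

-- ===== VERDICT (by name: the statement is the Claim_ definition above) =====
theorem count_users_spec : Claim_equal_count_users := by
  intro emails _
  show _ = _
  unfold count_users count_users_alt
  dsimp only
  rw [PySem.List.foldl_append_singleton_eq_map, count_users_step_eq,
    PySem.Dict.foldl_insert_getD_add_one_eq_counter, PySem.Dict.items_counter,
    PySem.List.dedup_eq_ofList]
  apply List.map_congr_left
  intro d _
  rw [tally_count _ (PySem.List.sorted_pairwise _ _) d,
    (PySem.List.sorted_perm (emails.map (fun e => ((PySem.Str.split? e "@").getD []).getLastD "")) (fun d => d) false).count_eq d]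
  simp
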